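-- pv_equiv track=rewrite | github.com/Amin-Mohamed1/ConnectFourGame | Application/Services/HeuristicCriterias/CouldConnectFourInTwoMoves.py | __connected_twos_horizontal
-- ===== SOURCE A (Python) =====
-- def __connected_twos_horizontal(board: list[list[str]], piece: str) -> int:
--     score: int = 0
--     for row in range(len(board)):
--         piece_count: int = 0
--         for col in range(len(board[0])):
--             if board[row][col] == piece:
--                 piece_count += 1
--                 if piece_count >= 2:
--                     if col + 2 < len(board[0]) and board[row][col + 1] == '' and board[row][col + 2] == '':
--                         score += 1
--                     if col - 3 >= 0 and board[row][col - 2] == '' and board[row][col - 3] == '':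
--                         score += 1
--             else:
--                 piece_count = 0
--     return score
-- ===== SOURCE B (Python) =====
-- def __connected_twos_horizontal(board: list[list[str]], piece: str) -> int:
--     score: int = 0
--     width: int = len(board[0]) if board else 0
--     for row in board:
--         for s in range(width - 3):
--             if row[s] == piece and row[s + 1] == piece and row[s + 2] == '' and row[s + 3] == '':
--                 score += 1
--             if row[s] == '' and row[s + 1] == '' and row[s + 2] == piece and row[s + 3] == piece:
--                 score += 1
--     return score
-- ===== Notes on version B (the rewrite author's own statement) =====
-- stated objective: simpler
-- what changed: A's stateful inner loop (a running piece_count reset on mismatch, with separate look-ahead and look-behind empty-cell checks) is replaced by a stateless length-4 sliding window per row that independently counts the two patterns 'P P _ _' and '_ _ P P'.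
import Mathlib
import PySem

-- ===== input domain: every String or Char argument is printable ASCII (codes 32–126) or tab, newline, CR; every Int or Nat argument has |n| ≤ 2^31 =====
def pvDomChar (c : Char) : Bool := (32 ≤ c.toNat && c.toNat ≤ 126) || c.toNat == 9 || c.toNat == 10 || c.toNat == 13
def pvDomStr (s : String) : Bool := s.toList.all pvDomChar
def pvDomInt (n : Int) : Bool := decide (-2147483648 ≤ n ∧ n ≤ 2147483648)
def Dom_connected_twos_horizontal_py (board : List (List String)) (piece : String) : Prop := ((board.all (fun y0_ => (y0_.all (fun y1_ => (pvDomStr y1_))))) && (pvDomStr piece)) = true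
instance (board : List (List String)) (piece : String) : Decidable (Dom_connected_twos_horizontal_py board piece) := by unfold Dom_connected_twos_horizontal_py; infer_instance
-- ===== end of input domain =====

-- B replaces A's running piece-count state machine by a stateless length-4 sliding window
-- (count windows 'P P _ _' and '_ _ P P' per row); objective: simpler.

-- ===== PORT A =====
-- one inner-loop iteration of A: state = (piece_count, score), col the loop variable
def pvAStep (row : List String) (piece : String) (w : Int) (st : Int × Int) (col : Int) : Int × Int :=
  if PySem.List.pyGetD row col "" = piece then
    let pc := st.1 + 1
    if 2 ≤ pc then
      let s1 := if col + 2 < w ∧ PySem.List.pyGetD row (col + 1) "" = "" ∧ PySem.List.pyGetD row (col + 2) "" = "" then st.2 + 1 else st.2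
      let s2 := if 0 ≤ col - 3 ∧ PySem.List.pyGetD row (col - 2) "" = "" ∧ PySem.List.pyGetD row (col - 3) "" = "" then s1 + 1 else s1
      (pc, s2)
    else (pc, st.2)
  else (0, st.2)

def connected_twos_horizontal_py (board : List (List String)) (piece : String) : Int :=
  let w : Int := ((board.headD []).length : Int)
  board.foldl (fun score row => ((PySem.List.pyRange 0 w 1).foldl (pvAStep row piece w) (0, score)).2) 0

-- ===== PORT B =====
-- one window of B: adds 1 for pattern 'P P _ _' and 1 for pattern '_ _ P P' at start s
def pvBWin (row : List String) (piece : String) (sc : Int) (s : Int) : Int :=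
  let sc1 := if PySem.List.pyGetD row s "" = piece ∧ PySem.List.pyGetD row (s + 1) "" = piece ∧ PySem.List.pyGetD row (s + 2) "" = "" ∧ PySem.List.pyGetD row (s + 3) "" = "" then sc + 1 else sc
  if PySem.List.pyGetD row s "" = "" ∧ PySem.List.pyGetD row (s + 1) "" = "" ∧ PySem.List.pyGetD row (s + 2) "" = piece ∧ PySem.List.pyGetD row (s + 3) "" = piece then sc1 + 1 else sc1

def connected_twos_horizontal_py_alt (board : List (List String)) (piece : String) : Int :=
  let w : Int := ((board.headD []).length : Int)
  board.foldl (fun score row => (PySem.List.pyRange 0 (w - 3) 1).foldl (pvBWin row piece) score) 0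

-- ===== PRECONDITION & SPEC =====
-- Pre_ excludes exactly the ragged boards on which Python A raises IndexError:
-- A indexes every row at columns 0..len(board[0])-1, so each row must be at least as long as the first.
def Pre_connected_twos_horizontal_py (board : List (List String)) (piece : String) : Prop :=
  ∀ r ∈ board, (board.headD []).length ≤ r.length
instance (board : List (List String)) (piece : String) : Decidable (Pre_connected_twos_horizontal_py board piece) := by unfold Pre_connected_twos_horizontal_py; infer_instance
def pvWitness_connected_twos_horizontal_py : List (List String) × String := ([["X", "X", "", ""], ["", "", "X", "X"]], "X")

def Spec_connected_twos_horizontal_py (board : List (List String)) (piece : String) (out : Int) : Prop := out = connected_twos_horizontal_py_alt board piece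
instance (board : List (List String)) (piece : String) (out : Int) : Decidable (Spec_connected_twos_horizontal_py board piece out) := by unfold Spec_connected_twos_horizontal_py; infer_instance

-- ===== CLAIM (what is proved, stated in full; the proofs are below) =====
def Claim_equal_connected_twos_horizontal_py : Prop := ∀ (board : List (List String)) (piece : String), Dom_connected_twos_horizontal_py board piece → Pre_connected_twos_horizontal_py board piece → Spec_connected_twos_horizontal_py board piece (connected_twos_horizontal_py board piece)

-- ===== LEMMAS AND PROOFS =====

-- per-column contribution of A's first (look-ahead) score bump, expressed positionally
def pvC1 (row : List String) (piece : String) (w c : Int) : Int :=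
  if 1 ≤ c ∧ c + 2 < w ∧ PySem.List.pyGetD row (c - 1) "" = piece ∧ PySem.List.pyGetD row c "" = piece ∧ PySem.List.pyGetD row (c + 1) "" = "" ∧ PySem.List.pyGetD row (c + 2) "" = "" then 1 else 0

-- per-column contribution of A's second (look-behind) score bump
def pvC2 (row : List String) (piece : String) (c : Int) : Int :=
  if 1 ≤ c ∧ 3 ≤ c ∧ PySem.List.pyGetD row (c - 3) "" = "" ∧ PySem.List.pyGetD row (c - 2) "" = "" ∧ PySem.List.pyGetD row (c - 1) "" = piece ∧ PySem.List.pyGetD row c "" = piece then 1 else 0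

-- per-window contributions of B's two patterns
def pvP1 (row : List String) (piece : String) (s : Int) : Int :=
  if PySem.List.pyGetD row s "" = piece ∧ PySem.List.pyGetD row (s + 1) "" = piece ∧ PySem.List.pyGetD row (s + 2) "" = "" ∧ PySem.List.pyGetD row (s + 3) "" = "" then 1 else 0
def pvP2 (row : List String) (piece : String) (s : Int) : Int :=
  if PySem.List.pyGetD row s "" = "" ∧ PySem.List.pyGetD row (s + 1) "" = "" ∧ PySem.List.pyGetD row (s + 2) "" = piece ∧ PySem.List.pyGetD row (s + 3) "" = piece then 1 else 0

-- invariant of A's inner loop: piece_count ≥ 1 iff the previous cell matched,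
-- and then the loop just sums the positional contributions pvC1 + pvC2
lemma pvAloop (row : List String) (piece : String) (w : Int) :
    ∀ (n : Nat) (a pc s : Int), 0 ≤ a → 0 ≤ pc →
      ((1 ≤ pc) ↔ (1 ≤ a ∧ PySem.List.pyGetD row (a - 1) "" = piece)) →
      ((PySem.List.pyRange a (a + n) 1).foldl (pvAStep row piece w) (pc, s)).2
        = s + ((PySem.List.pyRange a (a + n) 1).map (fun c => pvC1 row piece w c + pvC2 row piece c)).sum := by
  intro n
  induction n with
  | zero =>
    intro a pc s _ _ _
    rw [show a + ((0 : Nat) : Int) = a from by push_cast; ring,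
        PySem.List.pyRange_one_eq_nil le_rfl]
    simp
  | succ n ih =>
    intro a pc s ha hpc hinv
    have hlt : a < a + ((n + 1 : Nat) : Int) := by push_cast; omega
    rw [PySem.List.pyRange_one_cons hlt]
    have hre : a + ((n + 1 : Nat) : Int) = (a + 1) + (n : Int) := by push_cast; ring
    rw [hre]
    simp only [List.foldl_cons, List.map_cons, List.sum_cons]
    by_cases hp : PySem.List.pyGetD row a "" = piece
    · have hstep : pvAStep row piece w (pc, s) a =
          (pc + 1, s + (pvC1 row piece w a + pvC2 row piece a)) := by
        simp only [pvAStep, pvC1, pvC2, hp, if_pos]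
        have h2 : (2 ≤ pc + 1) ↔ (1 ≤ a ∧ PySem.List.pyGetD row (a - 1) "" = piece) := by
          rw [← hinv]; omega
        split_ifs with g1 g2 g3 g4 g5 g6 g7 g8 g9 <;> simp_all <;> omega
      rw [hstep, ih (a + 1) (pc + 1) _ (by omega) (by omega)
        (by simp only [add_sub_cancel_right]; constructor
            · intro _; exact ⟨by omega, hp⟩
            · intro _; omega)]
      ring
    · have hstep : pvAStep row piece w (pc, s) a = (0, s) := by
        simp [pvAStep, hp]
      have hc1 : pvC1 row piece w a = 0 := by simp [pvC1, hp]
      have hc2 : pvC2 row piece a = 0 := by simp [pvC2, hp]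
      rw [hstep, ih (a + 1) 0 s (by omega) (by omega)
        (by simp only [add_sub_cancel_right]
            constructor
            · intro h; omega
            · rintro ⟨-, h⟩; exact absurd h hp)]
      rw [hc1, hc2]; ring

-- B's window step just adds pvP1 + pvP2
lemma pvBWin_eq (row : List String) (piece : String) (sc s : Int) :
    pvBWin row piece sc s = sc + (pvP1 row piece s + pvP2 row piece s) := by
  simp only [pvBWin, pvP1, pvP2]
  split_ifs <;> ring

-- list-sum over range as a Finset sum
lemma pvSumRange (N : Nat) (f : Nat → Int) :
    ((List.range N).map f).sum = ∑ i ∈ Finset.range N, f i := rfl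

-- reindex A's look-ahead contributions onto B's first pattern (shift by 1)
lemma pvSumC1 (row : List String) (piece : String) (N : Nat) :
    (∑ k ∈ Finset.range N, pvC1 row piece (N : Int) (k : Int))
      = ∑ i ∈ Finset.range (N - 3), pvP1 row piece (i : Int) := by
  by_cases hN : N < 4
  · have h1 : N - 3 = 0 := by omega
    rw [h1, Finset.range_zero, Finset.sum_empty]
    refine Finset.sum_eq_zero (fun k hk => ?_)
    have hk' : k < N := Finset.mem_range.mp hk
    simp only [pvC1]
    rw [if_neg]
    rintro ⟨hge1, hlt, -⟩; omega
  · have hsub : ∑ k ∈ Finset.range N, pvC1 row piece (N : Int) (k : Int)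
        = ∑ k ∈ Finset.range (N - 2), pvC1 row piece (N : Int) (k : Int) := by
      have hss : Finset.range (N - 2) ⊆ Finset.range N := by
        intro x hx; rw [Finset.mem_range] at *; omega
      refine (Finset.sum_subset hss (fun x hx hnx => ?_)).symm
      have h1 : x < N := Finset.mem_range.mp hx
      have h2 : ¬ x < N - 2 := fun h => hnx (Finset.mem_range.mpr h)
      simp only [pvC1]
      rw [if_neg]
      rintro ⟨-, hlt, -⟩; omega
    rw [hsub, show N - 2 = (N - 3) + 1 from by omega, Finset.sum_range_succ']
    have h0 : pvC1 row piece (N : Int) ((0 : Nat) : Int) = 0 := by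
      simp [pvC1]
    rw [h0, add_zero]
    refine Finset.sum_congr rfl (fun i hi => ?_)
    have hi' : i < N - 3 := Finset.mem_range.mp hi
    have e0 : ((i + 1 : Nat) : Int) = (i : Int) + 1 := by push_cast; ring
    have e1 : (i : Int) + 1 - 1 = (i : Int) := by ring
    have e2 : (i : Int) + 1 + 1 = (i : Int) + 2 := by ring
    have e3 : (i : Int) + 1 + 2 = (i : Int) + 3 := by ring
    have hb1 : (1 : Int) ≤ (i : Int) + 1 := by omega
    have hb2 : (i : Int) + 3 < (N : Int) := by omega
    simp only [pvC1, pvP1, e0, e1, e2, e3, hb1, hb2, true_and]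
-- reindex A's look-behind contributions onto B's second pattern (shift by 3)
lemma pvSumC2 (row : List String) (piece : String) (N : Nat) :
    (∑ k ∈ Finset.range N, pvC2 row piece (k : Int))
      = ∑ i ∈ Finset.range (N - 3), pvP2 row piece (i : Int) := by
  by_cases hN : N < 4
  · have h1 : N - 3 = 0 := by omega
    rw [h1, Finset.range_zero, Finset.sum_empty]
    refine Finset.sum_eq_zero (fun k hk => ?_)
    have hk' : k < N := Finset.mem_range.mp hk
    simp only [pvC2]
    rw [if_neg]
    rintro ⟨-, hge3, -⟩
    omega
  · rw [show N = (N - 3) + 1 + 1 + 1 from by omega, Finset.sum_range_succ',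
        Finset.sum_range_succ', Finset.sum_range_succ']
    have hz : ∀ m : Nat, m < 3 → pvC2 row piece (m : Int) = 0 := by
      intro m hm
      simp only [pvC2]
      rw [if_neg]
      rintro ⟨-, hge3, -⟩
      omega
    rw [hz 0 (by omega), hz 1 (by omega), hz 2 (by omega)]
    simp only [add_zero]
    refine Finset.sum_congr rfl (fun i hi => ?_)
    have e0 : ((i + 1 + 1 + 1 : Nat) : Int) = (i : Int) + 3 := by push_cast; ring
    have e1 : (i : Int) + 3 - 3 = (i : Int) := by ring
    have e2 : (i : Int) + 3 - 2 = (i : Int) + 1 := by ring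
    have e3 : (i : Int) + 3 - 1 = (i : Int) + 2 := by ring
    have hb1 : (1 : Int) ≤ (i : Int) + 3 := by omega
    have hb3 : (3 : Int) ≤ (i : Int) + 3 := by omega
    simp only [pvC2, pvP2, e0, e1, e2, e3, hb1, hb3, true_and]

-- per-row equivalence: A's stateful pass over all w columns = B's window pass over w-3 starts
lemma pvRowEq (row : List String) (piece : String) (N : Nat) (s : Int) :
    ((PySem.List.pyRange 0 (N : Int) 1).foldl (pvAStep row piece (N : Int)) (0, s)).2
      = (PySem.List.pyRange 0 ((N : Int) - 3) 1).foldl (pvBWin row piece) s := by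
  have hA := pvAloop row piece (N : Int) N 0 0 s (by omega) (by omega) (by simp)
  rw [zero_add] at hA
  rw [hA]
  have hB : (PySem.List.pyRange 0 ((N : Int) - 3) 1).foldl (pvBWin row piece) s
      = (PySem.List.pyRange 0 ((N : Int) - 3) 1).foldl
          (fun acc x => acc + (pvP1 row piece x + pvP2 row piece x)) s := by
    exact PySem.List.foldl_congr_mem _ _ _ _ (fun acc x _ => pvBWin_eq row piece acc x)
  rw [hB, PySem.List.foldl_add]
  congr 1
  rw [PySem.List.pyRange_zero_nat, PySem.List.pyRange_zero, List.map_map, List.map_map,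
      pvSumRange, pvSumRange, show (((N : Int) - 3).toNat) = N - 3 from by omega]
  simp only [Function.comp]
  rw [Finset.sum_add_distrib, Finset.sum_add_distrib,
      pvSumC1 row piece N, pvSumC2 row piece N]

-- the whole board: fold the per-row equality through the row loop
lemma pvFoldEq (piece : String) (N : Nat) :
    ∀ (bd : List (List String)) (s : Int),
      bd.foldl (fun score row => ((PySem.List.pyRange 0 (N : Int) 1).foldl (pvAStep row piece (N : Int)) (0, score)).2) s
        = bd.foldl (fun score row => (PySem.List.pyRange 0 ((N : Int) - 3) 1).foldl (pvBWin row piece) score) s := by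
  intro bd
  induction bd with
  | nil => intro s; rfl
  | cons r tl ih => intro s; simp only [List.foldl_cons]; rw [pvRowEq r piece N s]; exact ih _

-- ===== VERDICT (by name: the statement is the Claim_ definition above) =====
theorem connected_twos_horizontal_py_spec : Claim_equal_connected_twos_horizontal_py := by
  intro board piece _ _
  unfold Spec_connected_twos_horizontal_py connected_twos_horizontal_py connected_twos_horizontal_py_alt
  exact pvFoldEq piece ((board.headD []).length) board 0
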